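-- pv_equiv track=rewrite | github.com/comp110-24f/comp-110-workspace-laragrilo | exercises/ex04_utils.py | all
-- ===== SOURCE A (Python) =====
-- def all(list1: list[int], numbers: int) -> bool:
--     """Returns True if all integers in list match the target integer"""
--     idx = 0
--     # check if the list is empty, return False if it is
--     if len(list1) == 0:
--         return False
--     # iterating through the list and compare each element with integer target
--     while idx < len(list1):
--         if list1[idx] != numbers:
--             return False
--         idx += 1
--     return True
-- ===== SOURCE B (Python) =====
-- def all(list1: list[int], numbers: int) -> bool:
--     """Returns True if all integers in list match the target integer"""
--     return len(list1) > 0 and set(list1) == {numbers}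
-- ===== Notes on version B (the rewrite author's own statement) =====
-- stated objective: idiomatic
-- what changed: Replaces the index-driven while loop with early exit by collapsing the list into its set of distinct values and comparing that set against the singleton {numbers}, guarded by a non-emptiness check.
import Mathlib
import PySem

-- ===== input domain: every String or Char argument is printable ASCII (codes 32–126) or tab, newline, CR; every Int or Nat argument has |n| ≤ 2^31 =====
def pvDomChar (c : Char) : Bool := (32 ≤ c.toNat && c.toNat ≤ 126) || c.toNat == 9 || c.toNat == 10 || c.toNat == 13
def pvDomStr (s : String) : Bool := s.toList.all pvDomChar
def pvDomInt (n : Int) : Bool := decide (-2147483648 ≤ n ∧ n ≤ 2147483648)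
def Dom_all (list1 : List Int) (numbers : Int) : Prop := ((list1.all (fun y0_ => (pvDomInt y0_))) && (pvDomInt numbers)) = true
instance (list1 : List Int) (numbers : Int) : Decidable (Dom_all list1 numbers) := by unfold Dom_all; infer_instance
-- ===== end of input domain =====

-- B replaces A's index-driven early-exit while loop by building set(list1) once and
-- comparing it to the singleton {numbers} (idiomatic; same O(n) cost).

-- ===== PORT A =====
-- the 'while idx < len(list1)' loop of A, step for step
def allLoop (list1 : List Int) (numbers : Int) (idx : Nat) : Bool :=
  if idx < list1.length then
    if list1.getD idx 0 ≠ numbers then false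
    else allLoop list1 numbers (idx + 1)
  else true
termination_by list1.length - idx

def all (list1 : List Int) (numbers : Int) : Bool :=
  if list1.length = 0 then false
  else allLoop list1 numbers 0

-- ===== PORT B =====
def all_alt (list1 : List Int) (numbers : Int) : Bool :=
  decide (list1.length > 0) && PySem.Set.equal (PySem.Set.ofList list1) (PySem.Set.ofList [numbers])

-- ===== PRECONDITION & SPEC =====
def Spec_all (list1 : List Int) (numbers : Int) (out : Bool) : Prop := out = all_alt list1 numbers
instance (list1 : List Int) (numbers : Int) (out : Bool) : Decidable (Spec_all list1 numbers out) := by unfold Spec_all; infer_instance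

-- ===== CLAIM (what is proved, stated in full; the proofs are below) =====
def Claim_equal_all : Prop := ∀ (list1 : List Int) (numbers : Int), Dom_all list1 numbers → Spec_all list1 numbers (all list1 numbers)

-- ===== LEMMAS AND PROOFS =====

theorem allLoop_eq_drop (list1 : List Int) (numbers : Int) (idx : Nat) :
    allLoop list1 numbers idx = (list1.drop idx).all (fun x => x == numbers) := by
  rw [allLoop]
  split
  · rename_i h
    rw [allLoop_eq_drop list1 numbers (idx + 1)]
    rw [List.drop_eq_getElem_cons h]
    simp only [List.all_cons]
    have : list1.getD idx 0 = list1[idx] := List.getD_eq_getElem list1 0 h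
    rw [this]
    by_cases hx : list1[idx] = numbers <;> simp [hx]
  · rename_i h
    rw [List.drop_eq_nil_of_le (by omega)]
    simp
termination_by list1.length - idx

theorem alt_eq_all (list1 : List Int) (numbers : Int) (hne : list1 ≠ []) :
    PySem.Set.equal (PySem.Set.ofList list1) (PySem.Set.ofList [numbers])
      = list1.all (fun x => x == numbers) := by
  rcases h : list1.all (fun x => x == numbers) with _ | _
  · rw [List.all_eq_false] at h
    obtain ⟨x, hx, hxn'⟩ := h
    have hxn : x ≠ numbers := by simpa using hxn'
    rw [Bool.eq_false_iff]
    intro hc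
    rw [PySem.Set.equal_iff] at hc
    have := (hc x).mp (by simpa [PySem.Set.mem_ofList] using hx)
    have hx2 : x ∈ [numbers] := by rw [← PySem.Set.mem_ofList]; exact this
    exact hxn (by simpa using hx2)
  · rw [PySem.Set.equal_iff]
    simp only [List.all_eq_true, beq_iff_eq] at h
    intro x
    simp only [PySem.Set.mem_ofList, List.mem_singleton]
    constructor
    · exact fun hx => h x hx
    · rintro rfl
      obtain ⟨y, hy⟩ := List.exists_mem_of_ne_nil list1 hne
      have := h y hy
      subst this
      exact hy

-- ===== VERDICT (by name: the statement is the Claim_ definition above) =====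
theorem all_spec : Claim_equal_all := by
  intro list1 numbers _
  unfold Spec_all all all_alt
  by_cases h : list1 = []
  · subst h; simp
  · have hlen : list1.length ≠ 0 := by simpa using h
    simp only [hlen, gt_iff_lt, Nat.pos_of_ne_zero hlen, decide_true, Bool.true_and]
    rw [allLoop_eq_drop, List.drop_zero, alt_eq_all list1 numbers h]
    simp
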